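-- pv_equiv track=rewrite | github.com/CliftonZG/LeetCode-Tutorial | Apply Operations to an Array.py | solution5
-- ===== SOURCE A (Python) =====
-- def solution5(nums):
--     """
--     Similar to the previous solution, but just subtract the current size from the original size instead, of tracking
--     the amount of zeros.
--
--     According to leetcode, this is worse in both time complexity and memory space than the previous solution.
--     """
--     original = len(nums)
--     size = original
--     i = 0
--     while i < size:
--         num = nums[i]
--         if num == 0:
--             del nums[i]
--             size -= 1
--         else:
--             if i < size - 1:
--                 if nums[i] == nums[i + 1]:
--                     nums[i] = num * 2
--                     nums[i + 1] = 0
--             i += 1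
--
--     return nums + ([0] * (original-size))
-- ===== SOURCE B (Python) =====
-- def solution5(nums):
--     # One pass with a pending value: double equal adjacent pairs, then stable
--     # zero compaction. Return value only: unlike A, does not mutate nums.
--     out = []
--     have = False
--     pend = 0
--     for x in nums:
--         if not have:
--             have = True
--             pend = x
--         elif pend == x:
--             out.append(2 * pend)
--             pend = 0
--         else:
--             out.append(pend)
--             pend = x
--     if have:
--         out.append(pend)
--     nonzero = [x for x in out if x != 0]
--     return nonzero + [0] * (len(out) - len(nonzero))
-- ===== Notes on version B (the rewrite author's own statement) =====
-- stated objective: faster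
-- what changed: A's in-place while loop with del (O(n) element shifts per zero) is replaced by a single pending-value pass that doubles equal adjacent pairs, followed by a filter-based stable zero compaction; B does not mutate nums (return value is identical).
import Mathlib
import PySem

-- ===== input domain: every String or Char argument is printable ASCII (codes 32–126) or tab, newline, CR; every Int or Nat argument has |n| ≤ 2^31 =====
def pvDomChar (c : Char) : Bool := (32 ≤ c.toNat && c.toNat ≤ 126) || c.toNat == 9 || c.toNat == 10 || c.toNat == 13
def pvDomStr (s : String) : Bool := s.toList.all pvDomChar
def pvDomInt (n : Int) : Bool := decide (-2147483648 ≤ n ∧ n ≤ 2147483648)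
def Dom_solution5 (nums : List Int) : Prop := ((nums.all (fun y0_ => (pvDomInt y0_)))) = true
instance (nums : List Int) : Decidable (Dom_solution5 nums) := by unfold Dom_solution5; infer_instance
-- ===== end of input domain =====

-- B replaces A's quadratic in-place while loop (del shifts elements) by one linear
-- pending-value pass plus a filter-based zero compaction; equivalence is about the
-- RETURN value only (A mutates its argument, B does not).

-- ===== PORT A =====
-- A's while loop: i, size as in the Python; `h` only records the loop invariant
-- size = nums.length (needed for totality of indexing), it changes no value.
def solution5Loop (nums : List Int) (size i : Nat) (h : size = nums.length) :
    List Int × Nat :=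
  if hi : i < size then
    let num := nums.getD i 0          -- nums[i], in range since i < size = length
    if num = 0 then
      solution5Loop (nums.eraseIdx i) (size - 1) i
        (by simp [List.length_eraseIdx, h ▸ hi, h])
    else
      if i < size - 1 then
        if nums.getD i 0 = nums.getD (i+1) 0 then
          solution5Loop ((nums.set i (num * 2)).set (i+1) 0) size (i+1) (by simp [h])
        else
          solution5Loop nums size (i+1) h
      else
        solution5Loop nums size (i+1) h
  else
    (nums, size)
termination_by size - i
decreasing_by all_goals omega

def solution5 (nums : List Int) : List Int :=
  let original := nums.length
  let r := solution5Loop nums original 0 rfl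
  r.1 ++ List.replicate (original - r.2) 0

-- ===== PORT B =====
-- Source B's single for-loop with state (out, have, pend), then the compaction.
def solution5AltStep (s : List Int × Bool × Int) (x : Int) : List Int × Bool × Int :=
  if !s.2.1 then (s.1, true, x)
  else if s.2.2 = x then (s.1 ++ [2 * s.2.2], true, 0)
  else (s.1 ++ [s.2.2], true, x)

def solution5_alt (nums : List Int) : List Int :=
  let st := nums.foldl solution5AltStep ([], false, 0)
  let out := if st.2.1 then st.1 ++ [st.2.2] else st.1
  let nonzero := out.filter (fun x => x ≠ 0)
  nonzero ++ List.replicate (out.length - nonzero.length) 0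

-- ===== PRECONDITION & SPEC =====
def Spec_solution5 (nums : List Int) (out : List Int) : Prop := out = solution5_alt nums
instance (nums : List Int) (out : List Int) : Decidable (Spec_solution5 nums out) := by unfold Spec_solution5; infer_instance

-- ===== CLAIM (what is proved, stated in full; the proofs are below) =====
def Claim_equal_solution5 : Prop := ∀ (nums : List Int), Dom_solution5 nums → Spec_solution5 nums (solution5 nums)

-- ===== LEMMAS AND PROOFS =====

-- the doubling pass, as a recursion (reference specification for both ports)
def pass5 : List Int → List Int
  | [] => []
  | [x] => [x]
  | x :: y :: t => if x = y then x * 2 :: pass5 (0 :: t) else x :: pass5 (y :: t)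
termination_by l => l.length
decreasing_by all_goals simp

theorem pass5_length : ∀ l : List Int, (pass5 l).length = l.length := by
  intro l
  induction l using pass5.induct <;> simp_all [pass5]

theorem filter_pass5_zero (t : List Int) :
    (pass5 (0 :: t)).filter (fun x => x ≠ 0) = (pass5 t).filter (fun x => x ≠ 0) := by
  match t with
  | [] => simp [pass5]
  | y :: t' =>
    by_cases hy : (0 : Int) = y
    · simp [pass5, ← hy]
    · simp [pass5, hy]

theorem filter_pass5_cons (x : Int) (t : List Int) (hx : x ≠ 0) :
    (x :: t).filter (fun a => a ≠ 0) = x :: t.filter (fun a => a ≠ 0) := by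
  simp [hx]

theorem solution5Loop_eq (k : Nat) : ∀ (nums : List Int) (size i : Nat)
    (h : size = nums.length) (_hk : size - i ≤ k) (_hi : i ≤ size),
    solution5Loop nums size i h =
      (nums.take i ++ (pass5 (nums.drop i)).filter (fun x => x ≠ 0),
       i + ((pass5 (nums.drop i)).filter (fun x => x ≠ 0)).length) := by
  induction k with
  | zero =>
    intro nums size i h hk hi
    have hie : i = size := by omega
    rw [solution5Loop]
    simp [hie, h, pass5]
  | succ k ih =>
    intro nums size i h hk hi
    rw [solution5Loop]
    by_cases hlt : i < size
    · simp only [hlt, dif_pos]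
      have hilen : i < nums.length := h ▸ hlt
      obtain ⟨num, t, hdrop⟩ : ∃ a t, nums.drop i = a :: t := by
        cases hd : nums.drop i with
        | nil => exfalso; have := List.drop_eq_nil_iff.mp hd; omega
        | cons a t => exact ⟨a, t, rfl⟩
      have hgetO : nums[i]? = some num := by
        have h1 : (nums.drop i)[0]? = nums[i+0]? := List.getElem?_drop
        rw [hdrop] at h1; simpa using h1.symm
      have hget : nums.getD i 0 = num := by simp [List.getD, hgetO]
      have htake1 : nums.take (i+1) = nums.take i ++ [num] := by
        rw [List.take_add_one, hgetO]; rfl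
      have hdropS : nums.drop (i+1) = t := by
        have hdd : nums.drop (i+1) = (nums.drop i).drop 1 := by
          rw [List.drop_drop]
        simp [hdd, hdrop]
      by_cases hz : num = 0
      · -- delete the zero at i
        subst hz
        rw [if_pos hget]
        have htake : (nums.eraseIdx i).take i = nums.take i := by
          rw [List.eraseIdx_eq_take_drop_succ]
          rw [List.take_append_of_le_length (by simp; omega)]
          simp [List.take_take]
        have hdrop' : (nums.eraseIdx i).drop i = t := by
          rw [List.eraseIdx_eq_take_drop_succ]
          rw [List.drop_append_of_le_length (by simp; omega)]
          simp [hdropS]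
        have hlen' : size - 1 = (nums.eraseIdx i).length := by
          simp [List.length_eraseIdx, hilen]; omega
        rw [ih (nums.eraseIdx i) (size - 1) i hlen' (by omega) (by omega)]
        rw [htake, hdrop', hdrop, filter_pass5_zero t]
      · rw [if_neg (fun hc => hz (hget.symm.trans hc))]
        by_cases hi1 : i < size - 1
        · -- there is a next element
          simp only [if_pos hi1]
          have hi1len : i + 1 < nums.length := by omega
          obtain ⟨y, t', ht⟩ : ∃ y t', t = y :: t' := by
            cases htc : t with
            | nil =>
              exfalso
              have := congrArg List.length hdrop
              simp [htc] at this; omega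
            | cons y t' => exact ⟨y, t', rfl⟩
          have hgety : nums.getD (i+1) 0 = y := by
            have h1 : (nums.drop i)[1]? = nums[i+1]? := List.getElem?_drop
            rw [hdrop, ht] at h1
            simp [List.getD, ← h1]
          by_cases heq : num = y
          · -- merge
            simp only [hget, hgety, if_pos heq]
            set nums' := (nums.set i (num * 2)).set (i+1) 0 with hn'
            have hlen2 : size = nums'.length := by simp [hn', h]
            rw [ih nums' size (i+1) hlen2 (by omega) (by omega)]
            have htake' : nums'.take (i+1) = nums.take i ++ [num * 2] := by
              rw [List.take_add_one]
              have hg : nums'[i]? = some (num * 2) := by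
                simp [hn', hilen]
              rw [hg]
              have htk : nums'.take i = nums.take i := by
                rw [hn', List.take_set_of_le (by omega),
                    List.take_set_of_le (by omega)]
              rw [htk]; rfl
            have hdropN : nums'.drop (i+1) = 0 :: t' := by
              rw [hn', List.drop_set]
              simp only [Nat.lt_irrefl]
              rw [List.drop_set_of_lt (by omega), hdropS, ht]
              simp
            rw [htake', hdropN, hdrop, ht]
            have hp : pass5 (num :: y :: t') = num * 2 :: pass5 (0 :: t') := by
              simp [pass5, heq]
            rw [hp, filter_pass5_cons _ _ (by simpa using hz)]
            simp [List.append_assoc]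
            omega
          · simp only [hget, hgety, if_neg heq]
            rw [ih nums size (i+1) h (by omega) (by omega)]
            rw [htake1, hdropS, hdrop, ht]
            have hp : pass5 (num :: y :: t') = num :: pass5 (y :: t') := by
              simp [pass5, heq]
            rw [hp, filter_pass5_cons _ _ hz]
            refine Prod.ext ?_ ?_
            · simp [List.append_assoc]
            · simp
              omega
        · -- last element
          simp only [if_neg hi1]
          have ht : t = [] := by
            have hl := congrArg List.length hdrop
            simp at hl
            have : t.length = 0 := by omega
            exact List.eq_nil_of_length_eq_zero this
          rw [ih nums size (i+1) h (by omega) (by omega)]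
          rw [htake1, hdropS, hdrop, ht]
          simp [pass5, hz]
    · simp only [dif_neg hlt]
      have hie : i = size := by omega
      simp [hie, h, pass5]

def finishB (s : List Int × Bool × Int) : List Int :=
  if s.2.1 then s.1 ++ [s.2.2] else s.1

theorem foldB_eq : ∀ (t acc : List Int) (v : Int),
    finishB (t.foldl solution5AltStep (acc, true, v)) = acc ++ pass5 (v :: t) := by
  intro t
  induction t with
  | nil => intro acc v; simp [finishB, pass5]
  | cons x t ihb =>
    intro acc v
    by_cases hvx : v = x
    · have hstep : solution5AltStep (acc, true, v) x = (acc ++ [2 * v], true, 0) := by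
        simp [solution5AltStep, hvx]
      simp only [List.foldl_cons, hstep, ihb]
      simp [pass5, hvx, mul_comm]
    · have hstep : solution5AltStep (acc, true, v) x = (acc ++ [v], true, x) := by
        simp [solution5AltStep, hvx]
      simp only [List.foldl_cons, hstep, ihb]
      simp [pass5, hvx]

theorem alt_eq (nums : List Int) :
    solution5_alt nums =
      (pass5 nums).filter (fun x => x ≠ 0) ++
        List.replicate (nums.length -
          ((pass5 nums).filter (fun x => x ≠ 0)).length) 0 := by
  cases nums with
  | nil => simp [solution5_alt, pass5]
  | cons x rest =>
    have hstep0 : solution5AltStep ([], false, 0) x = ([], true, x) := by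
      simp [solution5AltStep]
    have hout : finishB ((x :: rest).foldl solution5AltStep ([], false, 0))
        = pass5 (x :: rest) := by
      simp only [List.foldl_cons, hstep0]
      simpa using foldB_eq rest [] x
    show ((if _ then _ else _ : List Int).filter _ ++ _) = _
    rw [show (if ((x :: rest).foldl solution5AltStep ([], false, 0)).2.1 then
          ((x :: rest).foldl solution5AltStep ([], false, 0)).1 ++
            [((x :: rest).foldl solution5AltStep ([], false, 0)).2.2]
        else ((x :: rest).foldl solution5AltStep ([], false, 0)).1)
        = finishB ((x :: rest).foldl solution5AltStep ([], false, 0)) from rfl, hout]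
    rw [pass5_length]

theorem solution5_spec : Claim_equal_solution5 := by
  intro nums _
  unfold Spec_solution5
  show (solution5Loop nums nums.length 0 rfl).1 ++
      List.replicate (nums.length - (solution5Loop nums nums.length 0 rfl).2) 0
    = solution5_alt nums
  rw [solution5Loop_eq nums.length nums nums.length 0 rfl (by omega) (by omega)]
  simp only [List.take_zero, List.drop_zero, List.nil_append, Nat.zero_add]
  rw [alt_eq]
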